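-- pv_equiv track=rewrite | github.com/shivamkumar7878/Code-Signal-Languge | Intro/Smooth Sailing/allLongestStrings.py | allLongestStrings
-- ===== SOURCE A (Python) =====
-- def allLongestStrings(inputArray):
--     maxlength = 0
--     outputArray=[]
--     for i in range(0,len(inputArray)):
--         maxlength = len(inputArray[i]) if len(inputArray[i]) > maxlength else maxlength
--     for i in range(0,len(inputArray)):
--         if len(inputArray[i])==maxlength:
--             outputArray.append(inputArray[i])
--     return outputArray
-- ===== SOURCE B (Python) =====
-- def allLongestStrings(inputArray):
--     if not inputArray:
--         return []
--     buckets = {}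
--     for s in inputArray:
--         buckets.setdefault(len(s), []).append(s)
--     return buckets[max(buckets)]
-- ===== Notes on version B (the rewrite author's own statement) =====
-- stated objective: alternative
-- what changed: Replaces A's two index loops (max-find, then filter) with one pass that buckets strings by length in a dict and returns the bucket of the largest key (empty input guarded).
import Mathlib
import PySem

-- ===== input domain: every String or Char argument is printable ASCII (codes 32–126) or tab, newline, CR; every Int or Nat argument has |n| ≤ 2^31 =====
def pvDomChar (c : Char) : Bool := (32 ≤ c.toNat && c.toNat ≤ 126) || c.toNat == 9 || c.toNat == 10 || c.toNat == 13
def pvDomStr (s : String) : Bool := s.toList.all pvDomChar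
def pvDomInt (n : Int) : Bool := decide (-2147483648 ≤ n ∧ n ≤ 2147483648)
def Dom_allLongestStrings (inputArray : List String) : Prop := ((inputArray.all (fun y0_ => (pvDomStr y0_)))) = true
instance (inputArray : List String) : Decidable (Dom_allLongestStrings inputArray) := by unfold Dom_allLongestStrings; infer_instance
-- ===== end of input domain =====

-- B buckets the strings by length in one dict-building pass and returns the bucket of the
-- largest key, instead of A's two index loops (max-find then filter); same cost, different structure.

-- ===== PORT A =====
def allLongestStrings (inputArray : List String) : List String :=
  let maxlength : Int :=
    (PySem.List.pyRange 0 (PySem.List.len inputArray) 1).foldl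
      (fun m i =>
        if PySem.Str.len (PySem.List.pyGetD inputArray i "") > m
        then PySem.Str.len (PySem.List.pyGetD inputArray i "") else m) 0
  (PySem.List.pyRange 0 (PySem.List.len inputArray) 1).foldl
    (fun out i =>
      if PySem.Str.len (PySem.List.pyGetD inputArray i "") = maxlength
      then out ++ [PySem.List.pyGetD inputArray i ""] else out) []

-- ===== PORT B =====
def allLongestStrings_alt (inputArray : List String) : List String :=
  if inputArray = [] then []
  else
    let buckets : PySem.Dict Int (List String) :=
      inputArray.foldl (fun d s => d.modify (PySem.Str.len s) [] (fun v => v ++ [s]))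
        PySem.Dict.empty
    match PySem.List.max? buckets.keys (fun k => k) with
    | some m => buckets.getD m []
    | none => []

-- ===== PRECONDITION & SPEC =====
def Spec_allLongestStrings (inputArray : List String) (out : List String) : Prop := out = allLongestStrings_alt inputArray
instance (inputArray : List String) (out : List String) : Decidable (Spec_allLongestStrings inputArray out) := by unfold Spec_allLongestStrings; infer_instance

-- ===== CLAIM (what is proved, stated in full; the proofs are below) =====
def Claim_equal_allLongestStrings : Prop := ∀ (inputArray : List String), Dom_allLongestStrings inputArray → Spec_allLongestStrings inputArray (allLongestStrings inputArray)

-- ===== LEMMAS AND PROOFS =====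

-- A's second loop filters; first loop is a running max over the lengths.
theorem allLongestStrings_eq_filter (xs : List String) :
    allLongestStrings xs =
      xs.filter (fun s => PySem.Str.len s =
        (xs.map PySem.Str.len).foldl max 0) := by
  have hmax : xs.foldl (fun m s => if PySem.Str.len s > m then PySem.Str.len s else m) 0
      = (xs.map PySem.Str.len).foldl max 0 := by
    rw [List.foldl_map]
    apply PySem.List.foldl_congr_mem
    intro m s _
    simp only [max_def]
    split_ifs with h1 h2 h2 <;> omega
  have l2 : ∀ M : Int,
      (PySem.List.pyRange 0 (PySem.List.len xs) 1).foldl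
        (fun out i =>
          if PySem.Str.len (PySem.List.pyGetD xs i "") = M
          then out ++ [PySem.List.pyGetD xs i ""] else out) []
        = xs.filter (fun s => PySem.Str.len s = M) := by
    intro M
    rw [PySem.List.foldl_pyRange_zero_pyGetD xs ""
          (fun out s => if PySem.Str.len s = M then out ++ [s] else out) [],
        PySem.List.foldl_append_ite_eq_filter]
    simp
  unfold allLongestStrings
  rw [PySem.List.foldl_pyRange_zero_pyGetD xs ""
        (fun m s => if PySem.Str.len s > m then PySem.Str.len s else m) 0]
  simp only [l2, hmax]

-- The dict-building fold: lookup of a key c is the accumulated bucket plus the strings of length c.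
theorem getD_build (l : List String) (d : PySem.Dict Int (List String)) (c : Int) :
    (l.foldl (fun d s => d.modify (PySem.Str.len s) [] (fun v => v ++ [s])) d).getD c []
      = d.getD c [] ++ l.filter (fun s => PySem.Str.len s = c) := by
  induction l generalizing d with
  | nil => simp
  | cons x t ih =>
    simp only [List.foldl_cons, List.filter_cons, ih]
    rw [PySem.Dict.getD_modify]
    by_cases h : (x.length : Int) = c
    · simp [← h, List.append_assoc]
    · simp [h, Ne.symm h, PySem.Str.len]

theorem keys_build (l : List String) :
    (l.foldl (fun d s => d.modify (PySem.Str.len s) [] (fun v => v ++ [s]))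
        (PySem.Dict.empty : PySem.Dict Int (List String))).keys
      = PySem.Set.ofList (l.map PySem.Str.len) := by
  rw [PySem.Dict.keys_foldl_modify_key (key := PySem.Str.len)
        (f := fun _ s => fun v => v ++ [s])]
  simp [PySem.Dict.keys_empty, PySem.Set.update_nil_left]

-- running max of lengths with floor 0 = the max element of the lengths (nonempty, lengths ≥ 0)
theorem max_lengths (x : String) (t : List String) :
    ∀ m, PySem.List.max? (PySem.Set.ofList ((x :: t).map PySem.Str.len)) (fun k => k) = some m →
      m = ((x :: t).map PySem.Str.len).foldl max 0 := by
  intro m hm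
  set L := (x :: t).map PySem.Str.len with hL
  have hmem : m ∈ L := by
    have := PySem.List.max?_mem hm
    exact (PySem.Set.mem_ofList _ _).mp this
  have hub : ∀ y ∈ L, y ≤ m := by
    intro y hy
    exact PySem.List.max?_isMax hm y ((PySem.Set.mem_ofList _ _).mpr hy)
  have h1 : m ≤ L.foldl max 0 := (PySem.List.le_foldl_max L 0).2 m hmem
  have h2 : L.foldl max 0 ≤ m := by
    rcases PySem.List.foldl_max_mem L 0 with h | h
    · rw [h]
      have : PySem.Str.len x ∈ L := by simp [hL]
      have hx0 : 0 ≤ PySem.Str.len x := by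
        simp [PySem.Str.len]
      calc (0 : Int) ≤ PySem.Str.len x := hx0
        _ ≤ m := hub _ this
    · exact hub _ h
  omega

-- ===== VERDICT (by name: the statement is the Claim_ definition above) =====
theorem allLongestStrings_spec : Claim_equal_allLongestStrings := by
  intro xs _
  show allLongestStrings xs = allLongestStrings_alt xs
  rw [allLongestStrings_eq_filter]
  cases xs with
  | nil => simp [allLongestStrings_alt]
  | cons x t =>
    have halt : allLongestStrings_alt (x :: t) =
        match PySem.List.max?
            (((x :: t).foldl (fun d s => d.modify (PySem.Str.len s) [] (fun v => v ++ [s]))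
              (PySem.Dict.empty : PySem.Dict Int (List String))).keys) (fun k => k) with
        | some m =>
            ((x :: t).foldl (fun d s => d.modify (PySem.Str.len s) [] (fun v => v ++ [s]))
              (PySem.Dict.empty : PySem.Dict Int (List String))).getD m []
        | none => [] := by
      unfold allLongestStrings_alt
      rw [if_neg (List.cons_ne_nil x t)]
    rw [halt, keys_build]
    cases hm : PySem.List.max? (PySem.Set.ofList ((x :: t).map PySem.Str.len)) (fun k => k) with
    | none =>
      exfalso
      rw [PySem.List.max?_eq_none_iff] at hm
      simp [PySem.Set.ofList_cons] at hm
    | some m =>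
      show _ = ((x :: t).foldl (fun d s => d.modify (PySem.Str.len s) [] (fun v => v ++ [s]))
          (PySem.Dict.empty : PySem.Dict Int (List String))).getD m []
      rw [getD_build, PySem.Dict.getD_empty, List.nil_append, max_lengths x t m hm]
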